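-- pv_equiv track=rewrite | github.com/Carol773/GeeksForGeeks | Difficulty: Easy/N meetings in one room/n-meetings-in-one-room.py | maximumMeetings
-- ===== SOURCE A (Python) =====
-- def maximumMeetings(n,start,end):
--     # code here
--     meetings=sorted(zip(start,end), key=lambda x:x[1])
--
--     count=1
--     last_end_time=meetings[0][1]
--
--     for i in range(1,n):
--         current_start_time,current_end_time=meetings[i]
--
--         if current_start_time>last_end_time:
--             count+=1
--             last_end_time=current_end_time
--     return count
-- ===== SOURCE B (Python) =====
-- def maximumMeetings(n, start, end):
--     # Longest-compatible-chain dynamic programming after the forced earliest-ending meeting,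
--     # instead of A's greedy scan.
--     meetings = sorted(zip(start, end), key=lambda m: m[1])
--     first_start, first_end = meetings[0]
--     rest = [meetings[i] for i in range(1, n)]
--     suf = []   # (meeting, longest compatible chain starting there) for the suffix of rest seen so far
--     for s, e in reversed(rest):
--         b = 1
--         for (s2, e2), v in suf:
--             if s2 > e and v + 1 > b:
--                 b = v + 1
--         suf = [((s, e), b)] + suf
--     # the earliest-ending meeting is always scheduled; add the best chain that can follow it
--     best = 1
--     for (s2, e2), v in suf:
--         if s2 > first_end and v + 1 > best:
--             best = v + 1
--     return best
-- ===== Notes on version B (the rewrite author's own statement) =====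
-- stated objective: alternative
-- what changed: Replaces the greedy earliest-end scan by a longest-compatible-chain dynamic programming pass: the earliest-ending meeting is always scheduled, then a back-to-front DP over the remaining first-n sorted meetings computes the best chain of each suffix and the longest chain that can follow the first meeting.
import Mathlib
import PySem

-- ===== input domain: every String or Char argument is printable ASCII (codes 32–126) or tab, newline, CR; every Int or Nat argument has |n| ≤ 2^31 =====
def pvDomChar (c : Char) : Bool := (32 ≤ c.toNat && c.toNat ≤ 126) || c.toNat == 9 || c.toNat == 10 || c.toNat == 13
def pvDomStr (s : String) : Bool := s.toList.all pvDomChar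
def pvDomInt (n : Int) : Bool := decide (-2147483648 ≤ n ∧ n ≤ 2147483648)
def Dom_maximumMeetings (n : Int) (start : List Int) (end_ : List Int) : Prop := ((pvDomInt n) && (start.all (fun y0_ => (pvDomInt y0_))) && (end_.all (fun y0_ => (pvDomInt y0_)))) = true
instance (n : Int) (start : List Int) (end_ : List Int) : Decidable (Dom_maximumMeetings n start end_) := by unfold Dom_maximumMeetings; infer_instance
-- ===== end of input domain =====

-- B replaces A's greedy earliest-end scan by a longest-compatible-chain DP over the remaining
-- meetings after the forced earliest-ending one (objective: alternative algorithm, same results).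

-- ===== PORT A =====
-- one loop step of A: state (count, last_end_time), current meeting cur
def aStep (acc : Int × Int) (cur : Int × Int) : Int × Int :=
  if cur.1 > acc.2 then (acc.1 + 1, cur.2) else acc

def maximumMeetings (n : Int) (start : List Int) (end_ : List Int) : Int :=
  let meetings := PySem.List.sorted (start.zip end_) (fun x => x.2)
  -- meetings[0][1]; Pre_ guarantees the index is in range (IndexError otherwise)
  let lastEnd0 := (PySem.List.pyGetD meetings 0 (0, 0)).2
  -- for i in range(1, n): meetings[i]; Pre_ guarantees every index is in range
  let st := (PySem.List.pyRange 1 n 1).foldl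
      (fun acc i => aStep acc (PySem.List.pyGetD meetings i (0, 0))) (1, lastEnd0)
  st.1

-- ===== PORT B =====
-- Source B's scanning loops: best chain value that may start after a meeting ending at time e,
-- given suf = [(meeting, value)] pairs
def altInner (e : Int) (b0 : Int) (suf : List ((Int × Int) × Int)) : Int :=
  suf.foldl (fun b p => if p.1.1 > e ∧ p.2 + 1 > b then p.2 + 1 else b) b0

-- one step of Source B's reversed loop over rest: prepend (meeting, its best chain value)
def bStep (suf : List ((Int × Int) × Int)) (m : Int × Int) : List ((Int × Int) × Int) :=
  (m, altInner m.2 1 suf) :: suf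

def maximumMeetings_alt (n : Int) (start : List Int) (end_ : List Int) : Int :=
  let meetings := PySem.List.sorted (start.zip end_) (fun x => x.2)
  -- meetings[0]; Pre_ guarantees the index is in range (IndexError otherwise)
  let first := PySem.List.pyGetD meetings 0 (0, 0)
  -- rest = [meetings[i] for i in range(1, n)]; Pre_ guarantees every index is in range
  let rest := (PySem.List.pyRange 1 n 1).map (fun i => PySem.List.pyGetD meetings i (0, 0))
  let suf := rest.reverse.foldl bStep []
  altInner first.2 1 suf

-- ===== PRECONDITION & SPEC =====
-- exactly the inputs on which A returns (otherwise meetings[0] or meetings[i], i < n, raises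
-- IndexError; zip truncates to the shorter of the two lists)
def Pre_maximumMeetings (n : Int) (start : List Int) (end_ : List Int) : Prop :=
  1 ≤ min (start.length : Int) (end_.length : Int) ∧
  n ≤ min (start.length : Int) (end_.length : Int)
instance (n : Int) (start : List Int) (end_ : List Int) : Decidable (Pre_maximumMeetings n start end_) := by unfold Pre_maximumMeetings; infer_instance

def pvWitness_maximumMeetings : Int × List Int × List Int := (2, [1, 3], [2, 4])

def Spec_maximumMeetings (n : Int) (start : List Int) (end_ : List Int) (out : Int) : Prop := out = maximumMeetings_alt n start end_
instance (n : Int) (start : List Int) (end_ : List Int) (out : Int) : Decidable (Spec_maximumMeetings n start end_ out) := by unfold Spec_maximumMeetings; infer_instance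

-- ===== CLAIM (what is proved, stated in full; the proofs are below) =====
def Claim_equal_maximumMeetings : Prop := ∀ (n : Int) (start : List Int) (end_ : List Int), Dom_maximumMeetings n start end_ → Pre_maximumMeetings n start end_ → Spec_maximumMeetings n start end_ (maximumMeetings n start end_)

-- ===== LEMMAS AND PROOFS =====

-- okT t x: meeting x may follow a meeting ending at t (none = no predecessor)
def okT : Option Int → Int × Int → Bool
  | none, _ => true
  | some t, x => t < x.1

-- V t l: length of the longest chain of compatible meetings picked (in order) from l whose
-- first meeting satisfies okT t — the common specification of both ports
def V : Option Int → List (Int × Int) → Int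
  | _, [] => 0
  | t, x :: xs => if okT t x then max (V t xs) (1 + V (some x.2) xs) else V t xs

theorem V_nonneg (t : Option Int) (l : List (Int × Int)) : 0 ≤ V t l := by
  induction l generalizing t with
  | nil => simp [V]
  | cons x xs ih => simp only [V]; split_ifs <;> [skip; exact ih t]
                    exact le_trans (ih t) (le_max_left _ _)

theorem V_cons_le (t : Option Int) (x : Int × Int) (xs : List (Int × Int)) :
    V t xs ≤ V t (x :: xs) := by
  simp only [V]; split_ifs <;> [exact le_max_left _ _; exact le_rfl]

theorem V_mono (t t' : Option Int) (l : List (Int × Int))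
    (h : ∀ x, okT t' x = true → okT t x = true) : V t' l ≤ V t l := by
  induction l generalizing t t' with
  | nil => simp [V]
  | cons x xs ih =>
    simp only [V]
    by_cases h' : okT t' x = true
    · rw [if_pos h', if_pos (h x h')]
      exact max_le_max (ih t t' h) le_rfl
    · rw [if_neg h']
      refine le_trans (ih t t' h) (V_cons_le t x xs)

-- exchange lemma: dropping the chain's first meeting and prefixing one ending no later
theorem V_drop (xs : List (Int × Int)) (t : Option Int) (c : Int)
    (hc : ∀ y ∈ xs, c ≤ y.2) : V t xs ≤ 1 + V (some c) xs := by
  induction xs generalizing t with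
  | nil => simp [V]
  | cons y ys ih =>
    have hcy : c ≤ y.2 := hc y (by simp)
    have hys : ∀ z ∈ ys, c ≤ z.2 := fun z hz => hc z (List.mem_cons_of_mem _ hz)
    have h1 : V t ys ≤ 1 + V (some c) ys := ih t hys
    have h2 : V (some y.2) ys ≤ V (some c) ys := by
      refine V_mono _ _ _ (fun z hz => ?_)
      simp only [okT, decide_eq_true_eq] at hz ⊢; omega
    have h3 : V (some c) ys ≤ V (some c) (y :: ys) := V_cons_le _ y ys
    simp only [V]
    split_ifs <;> omega

-- A's greedy, extracted: count added by the scan given the last chosen end time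
def gA : Option Int → List (Int × Int) → Int
  | _, [] => 0
  | t, x :: xs => if okT t x then 1 + gA (some x.2) xs else gA t xs

theorem gA_eq_V (l : List (Int × Int)) (hs : l.Pairwise (fun a b => a.2 ≤ b.2)) :
    ∀ t, gA t l = V t l := by
  induction l with
  | nil => intro t; rfl
  | cons x xs ih =>
    intro t
    have hx : ∀ y ∈ xs, x.2 ≤ y.2 := (List.pairwise_cons.mp hs).1
    have hxs := (List.pairwise_cons.mp hs).2
    have hdrop : V t xs ≤ 1 + V (some x.2) xs := V_drop xs t x.2 hx
    simp only [gA, V]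
    split_ifs
    · rw [ih hxs (some x.2), max_eq_right hdrop]
    · exact ih hxs t

-- A's loop over the remaining meetings computes the greedy count
theorem foldA (ts : List (Int × Int)) :
    ∀ (c last : Int), (ts.foldl aStep (c, last)).1 = c + gA (some last) ts := by
  induction ts with
  | nil => intro c last; simp [gA]
  | cons y ys ih =>
    intro c last
    simp only [List.foldl_cons, aStep, gA, okT, decide_eq_true_eq]
    split_ifs with h
    · rw [ih]; omega
    · rw [ih]

-- value of Source B's suf list: best chain starting at each meeting of the suffix
def sufSpec : List (Int × Int) → List ((Int × Int) × Int)
  | [] => []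
  | x :: xs => (x, 1 + V (some x.2) xs) :: sufSpec xs

theorem innerL (xs : List (Int × Int)) :
    ∀ (e b0 : Int), 1 ≤ b0 →
      altInner e b0 (sufSpec xs) = max b0 (1 + V (some e) xs) := by
  induction xs with
  | nil => intro e b0 h; simp [altInner, sufSpec, V]; omega
  | cons y ys ih =>
    intro e b0 h
    simp only [altInner, sufSpec, List.foldl_cons] at ih ⊢
    have hv := V_nonneg (some y.2) ys
    have hv' := V_nonneg (some e) ys
    have hb1 : (1 : Int) ≤ if y.1 > e ∧ 1 + V (some y.2) ys + 1 > b0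
        then 1 + V (some y.2) ys + 1 else b0 := by split_ifs <;> omega
    rw [ih e _ hb1]
    simp only [V, okT, decide_eq_true_eq]
    split_ifs <;> omega

-- Source B's reversed loop builds exactly sufSpec of rest
theorem foldB (l : List (Int × Int)) :
    l.foldr (fun m suf => bStep suf m) [] = sufSpec l := by
  induction l with
  | nil => rfl
  | cons x xs ih =>
    rw [List.foldr_cons, ih]
    simp only [bStep, sufSpec]
    rw [innerL xs x.2 1 le_rfl]
    have hmax : max 1 (1 + V (some x.2) xs) = 1 + V (some x.2) xs := by
      have := V_nonneg (some x.2) xs; omega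
    rw [hmax]

-- the meetings rest = [meetings[i] for i in range(1, n)] of the end-sorted list keep
-- nondecreasing end times
theorem rest_pairwise (l : List (Int × Int)) (n : Int)
    (hs : l.Pairwise (fun a b => a.2 ≤ b.2)) (hn : n ≤ (l.length : Int)) :
    ((PySem.List.pyRange 1 n 1).map
        (fun i => PySem.List.pyGetD l i (0, 0))).Pairwise (fun a b => a.2 ≤ b.2) := by
  rw [List.pairwise_iff_getElem]
  intro a b ha hb hab
  simp only [List.length_map, PySem.List.length_pyRange_one] at ha hb
  have hgs := List.pairwise_iff_getElem.mp hs
  simp only [List.getElem_map, PySem.List.getElem_pyRange_one]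
  have hb' : (1 : Int) + b < (l.length : Int) := by omega
  have ha' : (1 : Int) + a < (l.length : Int) := by omega
  rw [PySem.List.pyGetD_eq_getElem l _ (by omega) ha',
      PySem.List.pyGetD_eq_getElem l _ (by omega) hb']
  have h1 : ((1 : Int) + a).toNat = 1 + a := by omega
  have h2 : ((1 : Int) + b).toNat = 1 + b := by omega
  simp only [h1, h2]
  exact hgs (1 + a) (1 + b) (by omega) (by omega) (by omega)

-- ===== VERDICT (by name: the statement is the Claim_ definition above) =====
theorem maximumMeetings_spec : Claim_equal_maximumMeetings := by
  intro n start end_ _ hpre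
  obtain ⟨h1, h2⟩ := hpre
  unfold Spec_maximumMeetings maximumMeetings maximumMeetings_alt
  have hsort := PySem.List.sorted_pairwise (start.zip end_) (fun x : Int × Int => x.2)
  have hlenS : ((PySem.List.sorted (start.zip end_) (fun x : Int × Int => x.2)).length : Int)
      = min (start.length : Int) (end_.length : Int) := by
    rw [PySem.List.length_sorted, List.length_zip]; omega
  generalize hS : PySem.List.sorted (start.zip end_) (fun x : Int × Int => x.2) = l
  rw [hS] at hsort hlenS
  have hnl : n ≤ (l.length : Int) := by omega
  cases l with
  | nil => simp at hlenS; omega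
  | cons h t =>
    show ((PySem.List.pyRange 1 n 1).foldl
        (fun acc i => aStep acc (PySem.List.pyGetD (h :: t) i (0, 0)))
        (1, (PySem.List.pyGetD (h :: t) 0 (0, 0)).2)).1
      = altInner (PySem.List.pyGetD (h :: t) 0 (0, 0)).2 1
          (((PySem.List.pyRange 1 n 1).map
              (fun i => PySem.List.pyGetD (h :: t) i (0, 0))).reverse.foldl bStep [])
    rw [PySem.List.pyGetD_zero_cons, ← List.foldl_map
        (f := fun i => PySem.List.pyGetD (h :: t) i ((0 : Int), (0 : Int))) (g := aStep),
      List.foldl_reverse, foldB, foldA,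
      gA_eq_V _ (rest_pairwise (h :: t) n hsort hnl) (some h.2),
      innerL _ h.2 1 le_rfl]
    have := V_nonneg (some h.2)
        ((PySem.List.pyRange 1 n 1).map (fun i => PySem.List.pyGetD (h :: t) i (0, 0)))
    omega
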